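-- pv_equiv track=rewrite | github.com/Balcalli17/Ing-Sistemas-UPEA-by-Balcalli | 2do Semestre/1er Practica/ejercicio_12.py | par_multi
-- ===== SOURCE A (Python) =====
-- def par_multi(num):
--     m = 1
--     while(num > 0):
--         d = num % 10
--         if d == 0:
--             num = num // 10
--         else:
--             if d % 2 == 0:
--                 m = m * d
--             else:
--                 d = 0
--             num = num // 10
--     return m
-- ===== SOURCE B (Python) =====
-- def par_multi(num):
--     if num <= 0:
--         return 1
--     m = 1
--     for c in str(num):
--         d = ord(c) - 48
--         if d != 0 and d % 2 == 0:
--             m = m * d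
--     return m
-- ===== Notes on version B (the rewrite author's own statement) =====
-- stated objective: idiomatic
-- what changed: B replaces A's arithmetic LSB-first digit extraction (%10 and //10 in a while loop) by an MSB-first traversal of str(num), multiplying in each nonzero even digit; results agree by commutativity of multiplication.
import Mathlib
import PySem

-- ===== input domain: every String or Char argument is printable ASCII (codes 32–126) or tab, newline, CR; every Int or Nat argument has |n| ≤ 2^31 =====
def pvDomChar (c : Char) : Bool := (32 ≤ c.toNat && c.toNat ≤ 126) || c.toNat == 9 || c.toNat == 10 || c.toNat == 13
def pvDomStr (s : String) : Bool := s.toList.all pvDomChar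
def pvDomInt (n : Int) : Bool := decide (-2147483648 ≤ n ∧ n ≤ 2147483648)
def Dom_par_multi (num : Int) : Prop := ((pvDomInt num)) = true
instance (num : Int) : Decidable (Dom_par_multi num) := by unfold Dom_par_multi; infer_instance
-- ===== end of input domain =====

-- B replaces A's arithmetic LSB-first digit extraction (while loop with %10 and //10)
-- by an MSB-first traversal of str(num) (idiomatic); return value equivalence is proved.

-- ===== PORT A =====
-- the while loop of A, on state (num, m)
def parMultiLoop (num m : Int) : Int :=
  if h : num > 0 then
    let d := PySem.Int.mod num 10
    if d = 0 then
      parMultiLoop (PySem.Int.floordiv num 10) m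
    else
      if PySem.Int.mod d 2 = 0 then
        parMultiLoop (PySem.Int.floordiv num 10) (m * d)
      else
        -- Python sets d = 0 here; d is dead afterwards
        parMultiLoop (PySem.Int.floordiv num 10) m
  else m
termination_by num.toNat
decreasing_by
  all_goals
    rw [PySem.Int.floordiv_eq_ediv_of_pos (by omega)]
    omega

def par_multi (num : Int) : Int := parMultiLoop num 1

-- ===== PORT B =====
def par_multi_alt (num : Int) : Int :=
  if num ≤ 0 then 1
  else
    (PySem.Int.toStr num).toList.foldl
      (fun m c =>
        let d : Int := (c.toNat : Int) - 48
        if d ≠ 0 ∧ PySem.Int.mod d 2 = 0 then m * d else m) 1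

-- ===== PRECONDITION & SPEC =====
def Spec_par_multi (num : Int) (out : Int) : Prop := out = par_multi_alt num
instance (num : Int) (out : Int) : Decidable (Spec_par_multi num out) := by unfold Spec_par_multi; infer_instance

-- ===== CLAIM (what is proved, stated in full; the proofs are below) =====
def Claim_equal_par_multi : Prop := ∀ (num : Int), Dom_par_multi num → Spec_par_multi num (par_multi num)

-- ===== LEMMAS AND PROOFS =====

-- the contribution of one decimal digit to the product
def pvG (d : Nat) : Int := if d ≠ 0 ∧ d % 2 = 0 then (d : Int) else 1

-- product of nonzero even digits of n, defined LSB-first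
def pvF (n : Nat) : Int :=
  if n = 0 then 1 else pvF (n / 10) * pvG (n % 10)

-- decimal digit characters of n, MSB-first (matches Nat.toDigitsCore's order)
def pvChars (n : Nat) : List Char :=
  if n / 10 = 0 then [Nat.digitChar (n % 10)]
  else pvChars (n / 10) ++ [Nat.digitChar (n % 10)]
decreasing_by exact Nat.div_lt_self (by omega) (by omega)

-- B's fold step
def pvStep (m : Int) (c : Char) : Int :=
  let d : Int := (c.toNat : Int) - 48
  if d ≠ 0 ∧ PySem.Int.mod d 2 = 0 then m * d else m

theorem parMultiLoop_eq_pvF : ∀ (n : Nat) (m : Int), parMultiLoop (n : Int) m = m * pvF n := by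
  intro n
  induction n using Nat.strong_induction_on with
  | _ n ih =>
    intro m
    by_cases h0 : n = 0
    · subst h0
      rw [parMultiLoop, pvF]
      norm_num
    · have hpos : 0 < n := Nat.pos_of_ne_zero h0
      have hgt : ((n : Int) > 0) := by exact_mod_cast hpos
      have hlt : n / 10 < n := Nat.div_lt_self hpos (by omega)
      have hmod10 : PySem.Int.mod (n : Int) 10 = ((n % 10 : Nat) : Int) :=
        PySem.Int.mod_natCast n 10
      have hdiv : PySem.Int.floordiv (n : Int) 10 = ((n / 10 : Nat) : Int) :=
        PySem.Int.floordiv_natCast n 10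
      have hmod2 : PySem.Int.mod ((n % 10 : Nat) : Int) 2 = ((n % 10 % 2 : Nat) : Int) := by
        exact_mod_cast PySem.Int.mod_natCast (n % 10) 2
      rw [parMultiLoop, dif_pos hgt]
      conv_rhs => rw [pvF, if_neg h0]
      simp only [hmod10, hdiv, hmod2]
      by_cases hz : n % 10 = 0
      · rw [if_pos (by exact_mod_cast hz), ih _ hlt m]
        simp only [pvG, if_neg (by simp [hz] : ¬(n % 10 ≠ 0 ∧ n % 10 % 2 = 0))]
        ring
      · rw [if_neg (show ¬((n % 10 : Nat) : Int) = 0 by exact_mod_cast hz)]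
        by_cases he : n % 10 % 2 = 0
        · rw [if_pos (show ((n % 10 % 2 : Nat) : Int) = 0 by exact_mod_cast he), ih _ hlt]
          simp only [pvG, if_pos (And.intro hz he)]
          ring
        · rw [if_neg (show ¬((n % 10 % 2 : Nat) : Int) = 0 by exact_mod_cast he), ih _ hlt]
          simp only [pvG, if_neg (show ¬(n % 10 ≠ 0 ∧ n % 10 % 2 = 0) by tauto)]
          ring

theorem toDigitsCore_eq_pvChars :
    ∀ (n : Nat), ∀ (f : Nat) (l : List Char), n ≤ f →
    Nat.toDigitsCore 10 (f + 1) n l = pvChars n ++ l := by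
  intro n
  induction n using Nat.strong_induction_on with
  | _ n ih =>
    intro f l hf
    rw [Nat.toDigitsCore]
    by_cases h : n / 10 = 0
    · rw [if_pos h]
      conv_rhs => rw [pvChars.eq_def]
      rw [if_pos h, List.singleton_append]
    · have h10 : 10 ≤ n := by omega
      obtain ⟨f', rfl⟩ : ∃ f', f = f' + 1 := ⟨f - 1, by omega⟩
      rw [if_neg h]
      have hlt : n / 10 < n := Nat.div_lt_self (by omega) (by omega)
      rw [ih (n / 10) hlt f' (Nat.digitChar (n % 10) :: l) (by omega)]
      conv_rhs => rw [pvChars.eq_def]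
      rw [if_neg h, List.append_assoc, List.singleton_append]

theorem toDigits_eq_pvChars (n : Nat) : Nat.toDigits 10 n = pvChars n :=
  (toDigitsCore_eq_pvChars n n [] (le_refl n)).trans (List.append_nil _)

theorem digitChar_toNat (d : Nat) (hd : d < 10) :
    ((Nat.digitChar d).toNat : Int) = 48 + (d : Int) := by
  interval_cases d <;> decide

theorem pvStep_digitChar (m : Int) (d : Nat) (hd : d < 10) :
    pvStep m (Nat.digitChar d) = m * pvG d := by
  have h48 : ((Nat.digitChar d).toNat : Int) - 48 = (d : Int) := by
    rw [digitChar_toNat d hd]; ring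
  have hmod : PySem.Int.mod (d : Int) 2 = ((d % 2 : Nat) : Int) := by
    exact_mod_cast PySem.Int.mod_natCast d 2
  simp only [pvStep, h48, hmod, pvG]
  by_cases h0 : d = 0
  · subst h0; simp
  · by_cases h2 : d % 2 = 0
    · rw [if_pos ⟨by exact_mod_cast h0, by exact_mod_cast h2⟩, if_pos ⟨h0, h2⟩]
    · rw [if_neg (fun hc => h2 (by exact_mod_cast hc.2)), if_neg (by tauto)]
      ring

theorem foldl_pvChars (n : Nat) : (pvChars n).foldl pvStep 1 = pvF n := by
  induction n using Nat.strong_induction_on with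
  | _ n ih =>
    rw [pvChars.eq_def]
    by_cases h : n / 10 = 0
    · rw [if_pos h]
      simp only [List.foldl_cons, List.foldl_nil]
      rw [pvStep_digitChar 1 (n % 10) (Nat.mod_lt _ (by omega))]
      rw [pvF]
      by_cases h0 : n = 0
      · subst h0; simp [pvG]
      · rw [if_neg h0, pvF.eq_def, if_pos h]
    · rw [if_neg h]
      have hlt : n / 10 < n := Nat.div_lt_self (by omega) (by omega)
      rw [List.foldl_append, ih _ hlt]
      simp only [List.foldl_cons, List.foldl_nil]
      rw [pvStep_digitChar _ (n % 10) (Nat.mod_lt _ (by omega))]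
      rw [pvF.eq_def (n := n), if_neg (by omega)]

-- ===== VERDICT (by name: the statement is the Claim_ definition above) =====
theorem par_multi_spec : Claim_equal_par_multi := by
  intro num _
  unfold Spec_par_multi par_multi par_multi_alt
  by_cases hle : num ≤ 0
  · rw [if_pos hle, parMultiLoop, dif_neg (by omega)]
  · rw [if_neg hle]
    have hpos : 0 < num := by omega
    have hnum : ((num.toNat : Nat) : Int) = num := Int.toNat_of_nonneg (le_of_lt hpos)
    have hA : parMultiLoop num 1 = pvF num.toNat := by
      conv_lhs => rw [← hnum]
      rw [parMultiLoop_eq_pvF]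
      ring
    have hchars : (PySem.Int.toStr num).toList = pvChars num.toNat := by
      rw [PySem.Int.toList_toStr, PySem.Int.toChars, if_neg (by omega),
        toDigits_eq_pvChars]
    rw [hA, hchars]
    exact (foldl_pvChars num.toNat).symm
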